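-- pv_equiv track=rewrite | github.com/mert-ozdemirr/CROssBARv2-Graph-RAG | src/backend/retriever.py | dynamic_subchunk_to_parent_mapping
-- ===== SOURCE A (Python) =====
-- def dynamic_subchunk_to_parent_mapping(length):
--     counts = [1] * length
--     parent_to_subchunk_mapping = {}
--     current_index = 0
--     for line_idx, count in enumerate(counts):
--         parent_to_subchunk_mapping[line_idx] = list(range(current_index, current_index + count))
--         current_index += count
--
--     subchunk_to_parent = {}
--     for parent_idx, subchunk_list in parent_to_subchunk_mapping.items():
--         for subchunk_idx in subchunk_list:
--             subchunk_to_parent[subchunk_idx] = parent_idx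
--
--     return subchunk_to_parent
-- ===== SOURCE B (Python) =====
-- def dynamic_subchunk_to_parent_mapping(length):
--     return {i: i for i in range(length)}
-- ===== Notes on version B (the rewrite author's own statement) =====
-- stated objective: simpler
-- what changed: B builds the identity mapping in one direct comprehension over range(length), removing A's intermediate parent-to-subchunk table, the current_index accumulator and the nested inversion pass.
import Mathlib
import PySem

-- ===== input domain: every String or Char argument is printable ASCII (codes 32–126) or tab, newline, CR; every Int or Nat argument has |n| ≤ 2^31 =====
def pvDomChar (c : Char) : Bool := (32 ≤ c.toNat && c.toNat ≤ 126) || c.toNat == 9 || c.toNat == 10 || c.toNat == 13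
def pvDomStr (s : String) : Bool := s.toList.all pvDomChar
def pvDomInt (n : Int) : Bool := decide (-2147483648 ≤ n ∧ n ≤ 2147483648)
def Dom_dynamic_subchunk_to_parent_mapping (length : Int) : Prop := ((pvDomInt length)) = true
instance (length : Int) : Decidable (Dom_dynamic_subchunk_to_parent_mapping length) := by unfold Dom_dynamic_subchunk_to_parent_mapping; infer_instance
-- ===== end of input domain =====

-- B replaces A's two-stage construction (forward parent->subchunk table, then a nested
-- inversion pass) by one direct identity-map construction over range(length); same O(n) cost.
-- ===== PORT A =====
def dynamic_subchunk_to_parent_mapping (length : Int) : List (Int × Int) :=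
  let counts : List Int := List.replicate length.toNat 1
  let st :=
    (PySem.List.enumerate counts 0).foldl
      (fun (st : PySem.Dict Int (List Int) × Int) lc =>
        (st.1.insert lc.1 (PySem.List.pyRange st.2 (st.2 + lc.2) 1), st.2 + lc.2))
      (PySem.Dict.empty, 0)
  let parent_to_subchunk := st.1
  let subchunk_to_parent :=
    parent_to_subchunk.items.foldl
      (fun (d : PySem.Dict Int Int) pr =>
        pr.2.foldl (fun d si => d.insert si pr.1) d)
      PySem.Dict.empty
  subchunk_to_parent.items

-- ===== PORT B =====
def dynamic_subchunk_to_parent_mapping_alt (length : Int) : List (Int × Int) :=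
  (PySem.List.pyRange 0 length 1).map (fun i => (i, i))

-- ===== PRECONDITION & SPEC =====
def Spec_dynamic_subchunk_to_parent_mapping (length : Int) (out : List (Int × Int)) : Prop := out = dynamic_subchunk_to_parent_mapping_alt length
instance (length : Int) (out : List (Int × Int)) : Decidable (Spec_dynamic_subchunk_to_parent_mapping length out) := by unfold Spec_dynamic_subchunk_to_parent_mapping; infer_instance

-- ===== CLAIM (what is proved, stated in full; the proofs are below) =====
def Claim_equal_dynamic_subchunk_to_parent_mapping : Prop := ∀ (length : Int), Dom_dynamic_subchunk_to_parent_mapping length → Spec_dynamic_subchunk_to_parent_mapping length (dynamic_subchunk_to_parent_mapping length)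

-- ===== LEMMAS AND PROOFS =====

-- A's first loop over `enumerate (replicate n 1) s` performs, in order, the inserts of the
-- singleton ranges [ci+j] at keys s+j, and ends with current index ci+n.
lemma pvFoldA (n : Nat) :
    ∀ (s ci : Int) (d : PySem.Dict Int (List Int)),
    (PySem.List.enumerate (List.replicate n (1 : Int)) s).foldl
        (fun (st : PySem.Dict Int (List Int) × Int) lc =>
          (st.1.insert lc.1 (PySem.List.pyRange st.2 (st.2 + lc.2) 1), st.2 + lc.2))
        (d, ci)
      = ((List.range n).foldl (fun d' j => d'.insert (s + (j : Int)) [ci + (j : Int)]) d, ci + n) := by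
  induction n with
  | zero => intro s ci d; simp
  | succ n ih =>
    intro s ci d
    rw [List.replicate_succ, PySem.List.enumerate_cons, List.foldl_cons]
    dsimp only
    rw [PySem.List.pyRange_one_singleton, ih (s + 1) (ci + 1),
        List.range_succ_eq_map, List.foldl_cons, List.foldl_map, Prod.mk.injEq]
    constructor
    · congr 1
      · funext x y
        simp only [Nat.succ_eq_add_one]
        have hk : s + 1 + (y : Int) = s + (((y + 1 : Nat)) : Int) := by push_cast; ring
        have hv : ci + 1 + (y : Int) = ci + (((y + 1 : Nat)) : Int) := by push_cast; ring
        rw [hk, hv]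
      · norm_num
    · push_cast; ring

-- A's inner inversion loop over a singleton subchunk list is a single insert.
lemma pvInner (n : Nat) :
    ((List.range n).map (fun (j : Nat) => ((j : Int), [(j : Int)]))).foldl
        (fun (d : PySem.Dict Int Int) pr =>
          pr.2.foldl (fun d si => d.insert si pr.1) d)
        PySem.Dict.empty
      = (List.range n).foldl (fun (d : PySem.Dict Int Int) (j : Nat) => d.insert (j : Int) (j : Int))
          PySem.Dict.empty := by
  rw [List.foldl_map]
  simp only [List.foldl_cons, List.foldl_nil]

lemma pvCastNodup (n : Nat) : ((List.range n).map (fun (j : Nat) => ((j : Int)))).Nodup :=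
  (List.nodup_range).map (fun _ _ h => by exact_mod_cast h)

-- ===== VERDICT (by name: the statement is the Claim_ definition above) =====
theorem dynamic_subchunk_to_parent_mapping_spec : Claim_equal_dynamic_subchunk_to_parent_mapping := by
  intro length _
  unfold Spec_dynamic_subchunk_to_parent_mapping
  unfold dynamic_subchunk_to_parent_mapping dynamic_subchunk_to_parent_mapping_alt
  simp only
  rw [pvFoldA length.toNat 0 0 PySem.Dict.empty]
  simp only [zero_add]
  rw [PySem.Dict.items_foldl_insert_fresh (List.range length.toNat)
        (fun (j : Nat) => ((j : Int))) (fun j => [(j : Int)]) PySem.Dict.empty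
        (fun j _ => PySem.Dict.contains_empty _) (pvCastNodup length.toNat)]
  have hie : (PySem.Dict.empty : PySem.Dict Int (List Int)).items = [] := rfl
  rw [hie, List.nil_append, pvInner length.toNat]
  rw [PySem.Dict.items_foldl_insert_fresh (List.range length.toNat)
        (fun (j : Nat) => ((j : Int))) (fun (j : Nat) => ((j : Int))) PySem.Dict.empty
        (fun j _ => PySem.Dict.contains_empty _) (pvCastNodup length.toNat)]
  have hie2 : (PySem.Dict.empty : PySem.Dict Int Int).items = [] := rfl
  rw [hie2, List.nil_append]
  by_cases h : length ≤ 0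
  · rw [PySem.List.pyRange_one_eq_nil h]
    simp [Int.toNat_of_nonpos h]
  · have hl : length = (length.toNat : Int) := (Int.toNat_of_nonneg (by omega)).symm
    rw [hl, PySem.List.pyRange_zero_natCast, List.map_map]
    rfl
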